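-- pv_equiv track=rewrite | github.com/gianlucamazza/website_ai-knowledge | scripts/fix_markdown_violations.py | fix_md026_trailing_punctuation
-- ===== SOURCE A (Python) =====
-- def fix_md026_trailing_punctuation(content: str) -> str:
--     """Remove trailing punctuation from headings."""
--     lines = content.split('\n')
--     new_lines = []
--
--     for line in lines:
--         if line.startswith('#') and line.strip():
--             # Remove trailing punctuation from headings
--             cleaned = line.rstrip(':.!?')
--             new_lines.append(cleaned)
--         else:
--             new_lines.append(line)
--
--     return '\n'.join(new_lines)
-- ===== SOURCE B (Python) =====
-- def fix_md026_trailing_punctuation(content: str) -> str: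
--     """Remove trailing punctuation from headings (single streaming pass)."""
--     out = []
--     pending = []          # buffered run of ':.!?' seen on a heading line
--     at_start = True       # at the first character of a line
--     is_heading = False    # current line starts with '#'
--     for ch in content:
--         if ch == '\n':
--             pending.clear()          # line ends: drop the heading's trailing run
--             out.append(ch)
--             at_start = True
--             is_heading = False
--         else:
--             if at_start:
--                 is_heading = (ch == '#')
--                 at_start = False
--             if is_heading and ch in ':.!?':
--                 pending.append(ch)
--             else:
--                 out.extend(pending)
--                 pending.clear()
--                 out.append(ch)
--     return ''.join(out)   # EOF also drops a pending run
-- ===== Notes on version B (the rewrite author's own statement) =====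
-- stated objective: alternative
-- what changed: Replaced the split-into-lines / per-line rstrip / join pipeline with a single streaming state-machine pass over the characters that buffers a run of trailing heading punctuation and drops it at each line end.
import Mathlib
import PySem

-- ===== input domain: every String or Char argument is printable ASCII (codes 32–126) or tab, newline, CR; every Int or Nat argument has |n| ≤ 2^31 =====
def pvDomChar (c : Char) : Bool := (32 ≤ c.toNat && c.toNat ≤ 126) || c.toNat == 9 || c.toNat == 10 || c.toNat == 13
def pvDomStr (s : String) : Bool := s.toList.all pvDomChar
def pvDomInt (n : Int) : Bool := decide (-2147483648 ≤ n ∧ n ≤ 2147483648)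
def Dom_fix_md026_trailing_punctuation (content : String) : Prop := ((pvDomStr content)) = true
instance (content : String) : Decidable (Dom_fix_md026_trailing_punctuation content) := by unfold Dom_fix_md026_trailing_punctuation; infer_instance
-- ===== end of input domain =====

-- B replaces A's split/per-line-rstrip/join with a single streaming state-machine pass over the characters (alternative decomposition, same O(n) cost).

-- ===== PORT A =====
def pvPunctsA : List Char := [':', '.', '!', '?']
-- line.rstrip(':.!?') ported by hand (PySem has no rstrip-with-charset): exact — removes the maximal trailing run of these characters
def pvRstripPunct (l : List Char) : List Char := (l.reverse.dropWhile (fun c => pvPunctsA.contains c)).reverse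

def fix_md026_trailing_punctuation (content : String) : String :=
  String.mk (PySem.Chars.join ['\n']
    ((PySem.Chars.splitOn content.toList ['\n']).foldl
      (fun acc line =>
        if PySem.Chars.startswith line ['#'] && !(PySem.Chars.strip line).isEmpty then
          acc ++ [pvRstripPunct line]
        else
          acc ++ [line]) []))

-- ===== PORT B =====
-- Source B's for-loop: state = (at_start, is_heading, pending, out)
def pvBLoop : List Char → Bool → Bool → List Char → List Char → List Char
  | [], _, _, _, out => out
  | c :: rest, atStart, isHeading, pending, out =>
    if c = '\n' then
      pvBLoop rest true false [] (out ++ [c])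
    else
      let isH := if atStart then decide (c = '#') else isHeading
      if isH && ([':', '.', '!', '?'] : List Char).contains c then
        pvBLoop rest false isH (pending ++ [c]) out
      else
        pvBLoop rest false isH [] (out ++ pending ++ [c])

def fix_md026_trailing_punctuation_alt (content : String) : String :=
  String.mk (pvBLoop content.toList true false [] [])

-- ===== PRECONDITION & SPEC =====
def Spec_fix_md026_trailing_punctuation (content : String) (out : String) : Prop := out = fix_md026_trailing_punctuation_alt content
instance (content : String) (out : String) : Decidable (Spec_fix_md026_trailing_punctuation content out) := by unfold Spec_fix_md026_trailing_punctuation; infer_instance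

-- ===== CLAIM (what is proved, stated in full; the proofs are below) =====
def Claim_equal_fix_md026_trailing_punctuation : Prop := ∀ (content : String), Dom_fix_md026_trailing_punctuation content → Spec_fix_md026_trailing_punctuation content (fix_md026_trailing_punctuation content)

-- ===== LEMMAS AND PROOFS =====

-- the per-line transformation A applies
def pvFixLine (line : List Char) : List Char :=
  if PySem.Chars.startswith line ['#'] && !(PySem.Chars.strip line).isEmpty then pvRstripPunct line else line

-- reference split on '\n', structural
def pvLines : List Char → List (List Char)
  | [] => [[]]
  | c :: t =>
    if c = '\n' then [] :: pvLines t
    else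
      match pvLines t with
      | h :: r => (c :: h) :: r
      | [] => [[c]]

lemma pvLines_ne_nil (l : List Char) : pvLines l ≠ [] := by
  cases l with
  | nil => simp [pvLines]
  | cons c t =>
    simp only [pvLines]
    split
    · simp
    · split <;> simp_all

lemma pvDropWhile_append_cons (p : Char → Bool) (a : List Char) (c : Char) (d : List Char)
    (hc : p c = false) :
    List.dropWhile p (a ++ c :: d) = List.dropWhile p a ++ c :: d := by
  induction a with
  | nil => simp [List.dropWhile_cons, hc]
  | cons x a ih => by_cases hx : p x <;> simp [List.dropWhile_cons, hx, ih]

def pvConsHead (p : List Char) : List (List Char) → List (List Char)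
  | [] => [p]
  | h :: r => (p ++ h) :: r

lemma pvConsHead_nil (xs : List (List Char)) (h : xs ≠ []) : pvConsHead [] xs = xs := by
  cases xs with
  | nil => exact absurd rfl h
  | cons a b => simp [pvConsHead]

lemma pvSplitOn_go_eq : ∀ (fuel : Nat) (l cur : List Char) (acc : List (List Char)),
    l.length ≤ fuel →
    PySem.Chars.splitOn.go ['\n'] fuel l cur acc = acc.reverse ++ pvConsHead cur.reverse (pvLines l) := by
  intro fuel
  induction fuel with
  | zero =>
    intro l cur acc h
    have : l = [] := List.length_eq_zero_iff.mp (Nat.le_zero.mp h)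
    subst this
    simp [PySem.Chars.splitOn.go, pvLines, pvConsHead]
  | succ n ih =>
    intro l cur acc h
    cases l with
    | nil => simp [PySem.Chars.splitOn.go, pvLines, pvConsHead]
    | cons c rest =>
      by_cases hc : c = '\n'
      · subst hc
        have hpre : List.isPrefixOf ['\n'] ('\n' :: rest) = true := by simp [List.isPrefixOf]
        rw [show PySem.Chars.splitOn.go ['\n'] (n+1) ('\n' :: rest) cur acc
            = PySem.Chars.splitOn.go ['\n'] n (List.drop (['\n'] : List Char).length ('\n' :: rest)) [] (cur.reverse :: acc) by
          simp [PySem.Chars.splitOn.go, hpre]]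
        simp only [List.length_singleton, List.drop_succ_cons, List.drop_zero]
        rw [ih rest [] (cur.reverse :: acc) (by simpa using Nat.le_of_succ_le_succ h)]
        rw [List.reverse_nil]
        rw [pvConsHead_nil _ (pvLines_ne_nil rest)]
        simp [pvLines, pvConsHead]
      · have hpre : List.isPrefixOf ['\n'] (c :: rest) = false := by
          simp [List.isPrefixOf]
          exact fun h' => (hc h'.symm).elim
        rw [show PySem.Chars.splitOn.go ['\n'] (n+1) (c :: rest) cur acc
            = PySem.Chars.splitOn.go ['\n'] n rest (c :: cur) acc by
          simp [PySem.Chars.splitOn.go, hpre]]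
        rw [ih rest (c :: cur) acc (by simpa using Nat.le_of_succ_le_succ h)]
        simp only [pvLines, if_neg hc]
        cases hr : pvLines rest with
        | nil => exact absurd hr (pvLines_ne_nil rest)
        | cons hh rr => simp [pvConsHead]

lemma pvSplitOn_eq (l : List Char) : PySem.Chars.splitOn l ['\n'] = pvLines l := by
  unfold PySem.Chars.splitOn
  rw [pvSplitOn_go_eq (l.length + 1) l [] [] (Nat.le_succ _)]
  simpa using pvConsHead_nil _ (pvLines_ne_nil l)

lemma pvFoldlA_eq_map : ∀ (ls : List (List Char)) (acc : List (List Char)),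
    ls.foldl (fun acc line =>
      if PySem.Chars.startswith line ['#'] && !(PySem.Chars.strip line).isEmpty then
        acc ++ [pvRstripPunct line]
      else acc ++ [line]) acc = acc ++ ls.map pvFixLine := by
  intro ls
  induction ls with
  | nil => intro acc; simp
  | cons x t ih =>
    intro acc
    simp only [List.foldl_cons, List.map_cons, ih]
    unfold pvFixLine
    split <;> simp

lemma pvIntercalate_singleton (s x : List Char) : List.intercalate s [x] = x := by
  simp [List.intercalate]

lemma pvIntercalate_cons (s x : List Char) (ys : List (List Char)) (h : ys ≠ []) :
    List.intercalate s (x :: ys) = x ++ s ++ List.intercalate s ys := by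
  cases ys with
  | nil => exact absurd rfl h
  | cons y zs => simp [List.intercalate, List.intersperse]

lemma pvLines_no_newline : ∀ (l : List Char), '\n' ∉ l → pvLines l = [l] := by
  intro l
  induction l with
  | nil => intro _; rfl
  | cons c t ih =>
    intro h
    have hc : ¬ c = '\n' := fun e => h (e ▸ List.mem_cons_self)
    have ht : '\n' ∉ t := fun e => h (List.mem_cons_of_mem _ e)
    simp [pvLines, hc, ih ht]

lemma pvLines_append : ∀ (line t : List Char), '\n' ∉ line →
    pvLines (line ++ '\n' :: t) = line :: pvLines t := by
  intro line
  induction line with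
  | nil => intro t _; simp [pvLines]
  | cons c l ih =>
    intro t h
    have hc : ¬ c = '\n' := fun e => h (e ▸ List.mem_cons_self)
    have hl : '\n' ∉ l := fun e => h (List.mem_cons_of_mem _ e)
    simp only [List.cons_append, pvLines, if_neg hc, ih t hl]

lemma pvRstrip_all_punct (l : List Char) (h : ∀ c ∈ l, pvPunctsA.contains c = true) :
    pvRstripPunct l = [] := by
  unfold pvRstripPunct
  have hd : List.dropWhile (fun c => pvPunctsA.contains c) l.reverse = [] := by
    rw [List.dropWhile_eq_nil_iff]
    intro x hx
    simpa using h x (List.mem_reverse.mp hx)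
  rw [hd]
  rfl

lemma pvRstrip_append_cons (a : List Char) (c : Char) (t : List Char)
    (hc : pvPunctsA.contains c = false) :
    pvRstripPunct (a ++ c :: t) = a ++ c :: pvRstripPunct t := by
  unfold pvRstripPunct
  rw [show (a ++ c :: t).reverse = t.reverse ++ c :: a.reverse by simp]
  rw [pvDropWhile_append_cons _ _ _ _ hc]
  simp only [List.reverse_append, List.reverse_cons, List.reverse_reverse, List.reverse_nil,
    List.nil_append, List.append_assoc, List.cons_append, List.singleton_append]

lemma pvStrip_cons_not_space (c : Char) (t : List Char) (hc : PySem.Chars.isspace c = false) :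
    (PySem.Chars.strip (c :: t)).isEmpty = false := by
  unfold PySem.Chars.strip PySem.Chars.lstrip PySem.Chars.rstrip
  rw [List.dropWhile_cons, if_neg (by simp [hc])]
  rw [show (c :: t).reverse = t.reverse ++ c :: [] by simp]
  rw [pvDropWhile_append_cons _ _ _ _ hc]
  simp

-- one step of pvBLoop in mid-line state (atStart = false)
lemma pvBLoop_cons_false (c : Char) (t : List Char) (b : Bool) (pending out : List Char)
    (hc : ¬ c = '\n') :
    pvBLoop (c :: t) false b pending out
      = if b && pvPunctsA.contains c then pvBLoop t false b (pending ++ [c]) out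
        else pvBLoop t false b [] (out ++ pending ++ [c]) := by
  simp [pvBLoop, hc, pvPunctsA]

-- one step of pvBLoop at the start of a line
lemma pvBLoop_cons_start (c : Char) (t : List Char) (out : List Char) (hc : ¬ c = '\n') :
    pvBLoop (c :: t) true false [] out
      = if decide (c = '#') && pvPunctsA.contains c then pvBLoop t false (decide (c = '#')) [c] out
        else pvBLoop t false (decide (c = '#')) [] (out ++ [c]) := by
  simp [pvBLoop, hc, pvPunctsA]

lemma pvBLoop_nonheading_eof : ∀ (l : List Char) (out : List Char), '\n' ∉ l →
    pvBLoop l false false [] out = out ++ l := by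
  intro l
  induction l with
  | nil => intro out _; simp [pvBLoop]
  | cons c t ih =>
    intro out h
    have hc : ¬ c = '\n' := fun e => h (e ▸ List.mem_cons_self)
    have ht : '\n' ∉ t := fun e => h (List.mem_cons_of_mem _ e)
    rw [pvBLoop_cons_false c t false [] out hc]
    rw [if_neg (by simp)]
    rw [ih _ ht]
    simp

lemma pvBLoop_nonheading_line : ∀ (l : List Char) (rest out : List Char), '\n' ∉ l →
    pvBLoop (l ++ '\n' :: rest) false false [] out
      = pvBLoop rest true false [] (out ++ l ++ ['\n']) := by
  intro l
  induction l with
  | nil => intro rest out _; simp [pvBLoop]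
  | cons c t ih =>
    intro rest out h
    have hc : ¬ c = '\n' := fun e => h (e ▸ List.mem_cons_self)
    have ht : '\n' ∉ t := fun e => h (List.mem_cons_of_mem _ e)
    rw [List.cons_append, pvBLoop_cons_false c (t ++ '\n' :: rest) false [] out hc]
    rw [if_neg (by simp)]
    rw [ih _ _ ht]
    simp

lemma pvBLoop_heading_eof : ∀ (l pending out : List Char), '\n' ∉ l →
    (∀ c ∈ pending, pvPunctsA.contains c = true) →
    pvBLoop l false true pending out = out ++ pvRstripPunct (pending ++ l) := by
  intro l
  induction l with
  | nil =>
    intro pending out _ hp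
    simp [pvBLoop, pvRstrip_all_punct pending hp]
  | cons c t ih =>
    intro pending out h hp
    have hc : ¬ c = '\n' := fun e => h (e ▸ List.mem_cons_self)
    have ht : '\n' ∉ t := fun e => h (List.mem_cons_of_mem _ e)
    rw [pvBLoop_cons_false c t true pending out hc]
    cases hpc : pvPunctsA.contains c with
    | true =>
      rw [if_pos (by simpa using hpc)]
      rw [ih (pending ++ [c]) out ht (by
        intro x hx
        rcases List.mem_append.mp hx with h1 | h1
        · exact hp x h1
        · simpa [List.mem_singleton.mp h1] using hpc)]
      simp
    | false =>
      rw [if_neg (by simpa using hpc)]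
      rw [ih [] (out ++ pending ++ [c]) ht (by intro x hx; simp at hx)]
      rw [pvRstrip_append_cons pending c t hpc]
      simp

lemma pvBLoop_heading_line : ∀ (l : List Char) (rest pending out : List Char), '\n' ∉ l →
    (∀ c ∈ pending, pvPunctsA.contains c = true) →
    pvBLoop (l ++ '\n' :: rest) false true pending out
      = pvBLoop rest true false [] (out ++ pvRstripPunct (pending ++ l) ++ ['\n']) := by
  intro l
  induction l with
  | nil =>
    intro rest pending out _ hp
    simp [pvBLoop, pvRstrip_all_punct pending hp]
  | cons c t ih =>
    intro rest pending out h hp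
    have hc : ¬ c = '\n' := fun e => h (e ▸ List.mem_cons_self)
    have ht : '\n' ∉ t := fun e => h (List.mem_cons_of_mem _ e)
    rw [List.cons_append, pvBLoop_cons_false c (t ++ '\n' :: rest) true pending out hc]
    cases hpc : pvPunctsA.contains c with
    | true =>
      rw [if_pos (by simpa using hpc)]
      rw [ih rest (pending ++ [c]) out ht (by
        intro x hx
        rcases List.mem_append.mp hx with h1 | h1
        · exact hp x h1
        · simpa [List.mem_singleton.mp h1] using hpc)]
      simp
    | false =>
      rw [if_neg (by simpa using hpc)]
      rw [ih rest [] (out ++ pending ++ [c]) ht (by intro x hx; simp at hx)]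
      rw [pvRstrip_append_cons pending c t hpc]
      simp

lemma pvDropWhile_head_false {p : Char → Bool} :
    ∀ {t : List Char} {e : Char} {d : List Char}, List.dropWhile p t = e :: d → p e = false := by
  intro t
  induction t with
  | nil => intro e d h; simp [List.dropWhile] at h
  | cons x xs ih =>
    intro e d h
    by_cases hx : p x
    · rw [List.dropWhile_cons, if_pos hx] at h; exact ih h
    · rw [List.dropWhile_cons, if_neg hx] at h
      cases h
      simpa using hx

lemma pvFixLine_nil : pvFixLine [] = [] := by
  have h0 : PySem.Chars.startswith [] ['#'] = false := by decide
  simp [pvFixLine, h0]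

lemma pvFixLine_cons (c : Char) (tw : List Char) (hntw : True) :
    pvFixLine (c :: tw) = if c = '#' then '#' :: pvRstripPunct tw else c :: tw := by
  by_cases hp : c = '#'
  · subst hp
    have hsw : PySem.Chars.startswith ('#' :: tw) ['#'] = true := by
      simp [PySem.Chars.startswith, List.isPrefixOf]
    have hst : (PySem.Chars.strip ('#' :: tw)).isEmpty = false :=
      pvStrip_cons_not_space '#' tw (by decide)
    have hr : pvRstripPunct ('#' :: tw) = '#' :: pvRstripPunct tw := by
      simpa using pvRstrip_append_cons [] '#' tw (by decide)
    simp [pvFixLine, hsw, hst, hr]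
  · have hne : ('#' : Char) ≠ c := fun e => hp e.symm
    have hsw : PySem.Chars.startswith (c :: tw) ['#'] = false := by
      simp [PySem.Chars.startswith, List.isPrefixOf, hne]
    simp [pvFixLine, hsw, hp]

lemma pvMain : ∀ (n : Nat) (l out : List Char), l.length ≤ n →
    pvBLoop l true false [] out
      = out ++ List.intercalate ['\n'] ((pvLines l).map pvFixLine) := by
  intro n
  induction n with
  | zero =>
    intro l out h
    have : l = [] := List.length_eq_zero_iff.mp (Nat.le_zero.mp h)
    subst this
    simp [pvBLoop, pvLines, pvFixLine_nil, pvIntercalate_singleton]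
  | succ n ih =>
    intro l out h
    cases l with
    | nil => simp [pvBLoop, pvLines, pvFixLine_nil, pvIntercalate_singleton]
    | cons c t =>
      by_cases hc : c = '\n'
      · subst hc
        rw [show pvBLoop ('\n' :: t) true false [] out = pvBLoop t true false [] (out ++ ['\n']) from by
          simp [pvBLoop]]
        rw [ih t (out ++ ['\n']) (by simpa using Nat.le_of_succ_le_succ h)]
        have hmapne : (pvLines t).map pvFixLine ≠ [] := by
          simpa using pvLines_ne_nil t
        rw [show pvLines ('\n' :: t) = [] :: pvLines t from by simp [pvLines]]
        rw [List.map_cons, pvIntercalate_cons _ _ _ hmapne]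
        simp [pvFixLine_nil]
      · set tw := t.takeWhile (fun x => !(x == '\n')) with htw
        set dw := t.dropWhile (fun x => !(x == '\n')) with hdw
        have hsplit : tw ++ dw = t := List.takeWhile_append_dropWhile
        have hntw : '\n' ∉ tw := by
          intro hmem
          have := List.mem_takeWhile_imp hmem
          simp at this
        have hnline : '\n' ∉ c :: tw := by
          intro hmem
          rcases List.mem_cons.mp hmem with h1 | h1
          · exact hc h1.symm
          · exact hntw h1
        cases hd : dw with
        | nil =>
          have hteq : t = tw := by rw [← hsplit, hd, List.append_nil]
          rw [hteq]
          rw [pvLines_no_newline _ hnline, List.map_singleton, pvIntercalate_singleton]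
          rw [pvBLoop_cons_start c tw out hc, pvFixLine_cons c tw trivial]
          by_cases hp : c = '#'
          · subst hp
            rw [if_neg (by decide), if_pos rfl]
            rw [show (decide (('#' : Char) = '#')) = true by decide]
            rw [pvBLoop_heading_eof tw [] (out ++ ['#']) hntw (by intro x hx; simp at hx)]
            simp
          · rw [if_neg (by simp [hp]), if_neg hp]
            rw [show (decide (c = '#')) = false by simp [hp]]
            rw [pvBLoop_nonheading_eof tw (out ++ [c]) hntw]
            simp
        | cons e d' =>
          have he : e = '\n' := by
            have := pvDropWhile_head_false (p := fun x => !(x == '\n')) (hdw ▸ hd)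
            simpa using this
          subst he
          have hteq : t = tw ++ '\n' :: d' := by rw [← hsplit, hd]
          have hlen : d'.length ≤ n := by
            have hLen : (c :: t).length ≤ n + 1 := h
            rw [hteq] at hLen
            simp [List.length_append] at hLen
            omega
          rw [hteq]
          rw [show pvLines (c :: (tw ++ '\n' :: d')) = (c :: tw) :: pvLines d' from by
            rw [← List.cons_append]; exact pvLines_append _ _ hnline]
          have hmapne : (pvLines d').map pvFixLine ≠ [] := by
            simpa using pvLines_ne_nil d'
          rw [List.map_cons, pvIntercalate_cons _ _ _ hmapne]
          rw [pvBLoop_cons_start c (tw ++ '\n' :: d') out hc, pvFixLine_cons c tw trivial]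
          by_cases hp : c = '#'
          · subst hp
            rw [if_neg (by decide), if_pos rfl]
            rw [show (decide (('#' : Char) = '#')) = true by decide]
            rw [pvBLoop_heading_line tw d' [] (out ++ ['#']) hntw (by intro x hx; simp at hx)]
            rw [ih d' _ hlen]
            simp
          · rw [if_neg (by simp [hp]), if_neg hp]
            rw [show (decide (c = '#')) = false by simp [hp]]
            rw [pvBLoop_nonheading_line tw d' (out ++ [c]) hntw]
            rw [ih d' _ hlen]
            simp

-- ===== VERDICT (by name: the statement is the Claim_ definition above) =====
theorem fix_md026_trailing_punctuation_spec : Claim_equal_fix_md026_trailing_punctuation := by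
  intro content _h
  unfold Spec_fix_md026_trailing_punctuation
  unfold fix_md026_trailing_punctuation fix_md026_trailing_punctuation_alt
  rw [pvSplitOn_eq, pvFoldlA_eq_map, pvMain content.toList.length content.toList [] le_rfl]
  simp [PySem.Chars.join]
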